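-- pv_equiv track=rewrite | github.com/CASH48/Codigo-Curso-Csibaja-2018280833 | Recursion de Pila/Numero Falso o Verdadero.py | numero_verdadero_falso
-- ===== SOURCE A (Python) =====
-- def numero_verdadero_falso (num) :
--     if (num == 0) :  # Condicion de parada
--         return True
--     else:
--         if ((num % 10) >= 0) and ((num % 10 ) <= 4):
--             return numero_verdadero_falso (num // 10)
--         else:
--                 return False
-- ===== SOURCE B (Python) =====
-- def numero_verdadero_falso(num):
--     if num < 0:
--         return False
--     while num:
--         num, d = divmod(num, 10)
--         if d > 4:
--             return False
--     return True
-- ===== Notes on version B (the rewrite author's own statement) =====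
-- stated objective: simpler
-- what changed: Replaced the unbounded recursion over signed ints (which handles negatives only implicitly, by recursing down to -1 whose digit 9 fails the check) by an explicit sign test followed by an iterative divmod loop over the nonnegative number; the redundant '>= 0' digit check disappears.
import Mathlib
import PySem

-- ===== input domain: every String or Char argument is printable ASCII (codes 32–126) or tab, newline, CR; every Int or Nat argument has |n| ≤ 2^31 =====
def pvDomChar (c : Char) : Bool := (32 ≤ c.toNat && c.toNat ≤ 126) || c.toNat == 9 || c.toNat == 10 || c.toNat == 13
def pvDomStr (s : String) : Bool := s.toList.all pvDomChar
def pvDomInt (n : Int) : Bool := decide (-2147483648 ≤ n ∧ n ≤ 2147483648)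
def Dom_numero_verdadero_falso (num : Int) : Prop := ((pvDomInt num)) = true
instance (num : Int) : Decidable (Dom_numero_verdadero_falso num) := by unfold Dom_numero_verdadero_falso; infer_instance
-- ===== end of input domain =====

-- B replaces A's unbounded signed recursion by a sign test plus an iterative divmod loop
-- over the nonnegative remainder (objective: simpler).

-- ===== PORT A =====
-- Literal port of A's recursion: base case num == 0, recurse on num // 10 while 0 <= num % 10 <= 4.
def numero_verdadero_falso (num : Int) : Bool :=
  if num = 0 then true
  else
    if 0 ≤ PySem.Int.mod num 10 ∧ PySem.Int.mod num 10 ≤ 4 then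
      numero_verdadero_falso (PySem.Int.floordiv num 10)
    else false
termination_by num.natAbs
decreasing_by
  rename_i hnz hr
  have hid : 10 * (Int.fdiv num 10) + Int.fmod num 10 = num := Int.mul_fdiv_add_fmod num 10
  simp only [PySem.Int.mod] at hr
  simp only [PySem.Int.floordiv]
  omega

-- ===== PORT B =====
-- B's while-loop over the (nonnegative) number, one divmod step per iteration.
-- num stays nonnegative throughout, so the loop state is carried as a Nat;
-- Python's divmod(num, 10) on a nonnegative int is exactly Nat division/remainder.
def pvAllDigitsLe4 (n : Nat) : Bool :=
  if n = 0 then true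
  else
    let d := n % 10
    if 4 < d then false else pvAllDigitsLe4 (n / 10)
termination_by n
decreasing_by
  exact Nat.div_lt_self (by omega) (by norm_num)

def numero_verdadero_falso_alt (num : Int) : Bool :=
  if num < 0 then false else pvAllDigitsLe4 num.toNat

-- ===== PRECONDITION & SPEC =====
def Spec_numero_verdadero_falso (num : Int) (out : Bool) : Prop := out = numero_verdadero_falso_alt num
instance (num : Int) (out : Bool) : Decidable (Spec_numero_verdadero_falso num out) := by unfold Spec_numero_verdadero_falso; infer_instance

-- ===== CLAIM (what is proved, stated in full; the proofs are below) =====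
def Claim_equal_numero_verdadero_falso : Prop := ∀ (num : Int), Dom_numero_verdadero_falso num → Spec_numero_verdadero_falso num (numero_verdadero_falso num)

-- ===== LEMMAS AND PROOFS =====

theorem pv_fmod_cast (n : Nat) : ((n : Int).fmod 10) = ((n % 10 : Nat) : Int) := by
  rw [Int.fmod_eq_emod]; omega

theorem pv_fdiv_cast (n : Nat) : ((n : Int).fdiv 10) = ((n / 10 : Nat) : Int) := by
  rw [Int.fdiv_eq_ediv]; omega

-- Every negative input ends in A's recursion at a negative number whose last digit exceeds 4.
theorem pv_A_neg (num : Int) (h : num < 0) : numero_verdadero_falso num = false := by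
  induction num using numero_verdadero_falso.induct with
  | case1 => omega
  | case2 n hz hr ih =>
      have hid : 10 * (Int.fdiv n 10) + Int.fmod n 10 = n := Int.mul_fdiv_add_fmod n 10
      simp only [PySem.Int.mod] at hr
      rw [numero_verdadero_falso, if_neg hz, if_pos (by simpa [PySem.Int.mod] using hr)]
      exact ih (by simp only [PySem.Int.floordiv]; omega)
  | case3 n hz hr =>
      rw [numero_verdadero_falso, if_neg hz, if_neg hr]

-- On nonnegative inputs A's recursion computes exactly B's digit loop.
theorem pv_A_nat (n : Nat) : numero_verdadero_falso (n : Int) = pvAllDigitsLe4 n := by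
  induction n using pvAllDigitsLe4.induct with
  | case1 =>
      rw [numero_verdadero_falso, pvAllDigitsLe4]
      simp
  | case2 n hz d hd =>
      have hnle : ¬ (0 ≤ PySem.Int.mod (n : Int) 10 ∧ PySem.Int.mod (n : Int) 10 ≤ 4) := by
        simp only [PySem.Int.mod, pv_fmod_cast]; omega
      rw [numero_verdadero_falso, pvAllDigitsLe4,
        if_neg (by exact_mod_cast hz : ¬ (n : Int) = 0), if_neg hnle, if_neg hz, if_pos hd]
  | case3 n hz d hd ih =>
      have hle : 0 ≤ PySem.Int.mod (n : Int) 10 ∧ PySem.Int.mod (n : Int) 10 ≤ 4 := by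
        simp only [PySem.Int.mod, pv_fmod_cast]; omega
      rw [numero_verdadero_falso, pvAllDigitsLe4,
        if_neg (by exact_mod_cast hz : ¬ (n : Int) = 0), if_pos hle, if_neg hz, if_neg hd]
      simp only [PySem.Int.floordiv, pv_fdiv_cast, ih]

-- ===== VERDICT (by name: the statement is the Claim_ definition above) =====
theorem numero_verdadero_falso_spec : Claim_equal_numero_verdadero_falso := by
  intro num _
  unfold Spec_numero_verdadero_falso numero_verdadero_falso_alt
  by_cases h : num < 0
  · simp [h, pv_A_neg num h]
  · have h0 : 0 ≤ num := by omega
    rw [if_neg h, ← pv_A_nat num.toNat, Int.toNat_of_nonneg h0]
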